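-- pv_equiv track=rewrite | github.com/arror403/leetcode_auto_sync_repo | 1663-detect-cycles-in-2d-grid/1663-detect-cycles-in-2d-grid.py | containsCycle
-- ===== SOURCE A (Python) =====
-- from typing import List
--
-- def containsCycle(grid: List[List[str]]) -> bool:
--     if not grid or not grid[0]:
--         return False
--
--     rows, cols = len(grid), len(grid[0])
--     visited = set()
--
--     def dfs(r, c, prev_r, prev_c, char):
--         # Mark the current cell as visited
--         visited.add((r, c))
--         # Standard 4-directional movement: down, up, right, left
--         directions = [(1, 0), (-1, 0), (0, 1), (0, -1)]
--
--         for dr, dc in directions: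
--             nr, nc = r + dr, c + dc
--             # 1. Check bounds
--             # 2. Check if the neighbor has the same character
--             if 0 <= nr < rows and 0 <= nc < cols and grid[nr][nc] == char:
--                 # If the neighbor is already visited and it's NOT the parent,
--                 # we found a cycle!
--                 if (nr, nc) in visited:
--                     if (nr, nc) != (prev_r, prev_c):
--                         return True
--                 else:
--                     # If not visited, recurse
--                     if dfs(nr, nc, r, c, char):
--                         return True
--
--         return False
--
--     # Iterate through every cell in the grid
--     for r in range(rows):
--         for c in range(cols):
--             # If the cell hasn't been visited, start a DFS from here
--             if (r, c) not in visited: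
--                 # We pass -1, -1 as the initial parent coordinates
--                 if dfs(r, c, -1, -1, grid[r][c]):
--                     return True
--
--
--     return False
-- ===== SOURCE B (Python) =====
-- from typing import List
--
-- # Iterative DFS: explicit stack of (r, c, prev_r, prev_c, next_dir_index) frames
-- # instead of A's recursion, so no recursion-depth limit; visited marked on push.
-- DIRS = [(1, 0), (-1, 0), (0, 1), (0, -1)]
--
-- def containsCycle(grid: List[List[str]]) -> bool:
--     if not grid or not grid[0]:
--         return False
--     rows, cols = len(grid), len(grid[0])
--     visited = set()
--     for sr in range(rows):
--         for sc in range(cols):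
--             if (sr, sc) in visited:
--                 continue
--             char = grid[sr][sc]
--             visited.add((sr, sc))
--             stack = [(sr, sc, -1, -1, 0)]
--             while stack:
--                 r, c, pr, pc, i = stack.pop()
--                 if i == 4:
--                     continue
--                 stack.append((r, c, pr, pc, i + 1))
--                 dr, dc = DIRS[i]
--                 nr, nc = r + dr, c + dc
--                 if 0 <= nr < rows and 0 <= nc < cols and grid[nr][nc] == char:
--                     if (nr, nc) in visited:
--                         if (nr, nc) != (pr, pc):
--                             return True
--                     else:
--                         visited.add((nr, nc))
--                         stack.append((nr, nc, r, c, 0))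
--     return False
-- ===== Notes on version B (the rewrite author's own statement) =====
-- stated objective: alternative
-- what changed: A's recursive DFS (a closure mutating a shared visited set, one dfs call per cell) is replaced by an iterative DFS driving an explicit stack of (cell, parent, next-direction-index) frames, so B needs no recursion and is immune to Python's recursion-depth limit on large grids.
-- outside the precondition, e.g. on containsCycle([['a', 'a'], ['a', 'a'], ['x', 'y'], ['c']]): A returns True, B returns True
import Mathlib
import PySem

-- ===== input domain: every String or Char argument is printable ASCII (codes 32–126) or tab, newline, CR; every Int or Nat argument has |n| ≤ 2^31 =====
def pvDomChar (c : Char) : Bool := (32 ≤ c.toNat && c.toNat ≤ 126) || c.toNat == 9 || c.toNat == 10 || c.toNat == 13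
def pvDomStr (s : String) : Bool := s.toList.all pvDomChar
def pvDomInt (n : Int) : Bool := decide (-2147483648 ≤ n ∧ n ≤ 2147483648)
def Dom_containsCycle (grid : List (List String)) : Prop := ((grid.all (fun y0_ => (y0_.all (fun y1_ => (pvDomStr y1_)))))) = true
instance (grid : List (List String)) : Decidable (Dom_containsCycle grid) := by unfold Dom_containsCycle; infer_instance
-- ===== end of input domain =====

-- B replaces A's recursive DFS closure by an iterative DFS over an explicit stack of
-- (cell, parent, next-direction-index) frames (same traversal, no recursion); return value only.

-- shared direction table [(1,0),(-1,0),(0,1),(0,-1)] and the (bounds-checked) access grid[r][c]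
def pvDirs : List (Int × Int) := [(1, 0), (-1, 0), (0, 1), (0, -1)]

def pvCell (grid : List (List String)) (r c : Int) : String :=
  (PySem.List.pyGet? ((PySem.List.pyGet? grid r).getD []) c).getD ""

-- ===== PORT A =====
-- body of A's `for dr, dc in directions` loop; `rec` is the recursive call dfs(nr, nc, r, c, char)
def stepA (grid : List (List String)) (rows cols : Int) (ch : String) (r c pr pc : Int)
    (rec : Int → Int → Int → Int → PySem.Set (Int × Int) → Bool × PySem.Set (Int × Int))
    (st : Bool × PySem.Set (Int × Int)) (d : Int × Int) : Bool × PySem.Set (Int × Int) :=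
  if st.1 then st
  else
    let nr := r + d.1
    let nc := c + d.2
    if 0 ≤ nr ∧ nr < rows ∧ 0 ≤ nc ∧ nc < cols then
      if pvCell grid nr nc = ch then
        if PySem.Set.contains st.2 (nr, nc) then
          if (nr, nc) ≠ (pr, pc) then (true, st.2) else st
        else rec nr nc r c st.2
      else st
    else st

-- A's dfs; the fuel (bounds the recursion depth, initial fuel = rows*cols) only makes it total
def dfsA (grid : List (List String)) (rows cols : Int) (ch : String) :
    Nat → Int → Int → Int → Int → PySem.Set (Int × Int) → Bool × PySem.Set (Int × Int)
  | 0, _, _, _, _, v => (false, v)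
  | Nat.succ n, r, c, pr, pc, v =>
    pvDirs.foldl
      (stepA grid rows cols ch r c pr pc
        (fun nr nc pr' pc' w => dfsA grid rows cols ch n nr nc pr' pc' w))
      (false, PySem.Set.add v (r, c))

def containsCycle (grid : List (List String)) : Bool :=
  match grid with
  | [] => false
  | row0 :: _ =>
    if row0.isEmpty then false
    else
      let rows : Int := (grid.length : Int)
      let cols : Int := ((row0.length : Nat) : Int)
      ((PySem.List.pyRange 0 rows 1).foldl (fun st r =>
          (PySem.List.pyRange 0 cols 1).foldl (fun st c =>
            if st.1 then st
            else if PySem.Set.contains st.2 (r, c) then st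
            else dfsA grid rows cols (pvCell grid r c) (grid.length * row0.length) r c (-1) (-1) st.2) st)
        (false, ([] : PySem.Set (Int × Int)))).1

-- ===== PORT B =====
structure PvFrame where
  r : Int
  c : Int
  pr : Int
  pc : Int
  i : Nat
  f : Nat
deriving DecidableEq, Repr

def pvMu (s : List PvFrame) : Nat := (s.map (fun t => (6 - t.i) * 8 ^ t.f + 1)).sum

theorem pvMu_child_key (i f : Nat) (hi : ¬ 4 ≤ i) (hf : ¬ f = 0) (S : Nat) :
    6 * 8 ^ (f - 1) + 1 + ((6 - (i + 1)) * 8 ^ f + 1 + S) < (6 - i) * 8 ^ f + 1 + S := by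
  obtain ⟨g, rfl⟩ : ∃ g, f = g + 1 := ⟨f - 1, by omega⟩
  have hP : 0 < 8 ^ g := Nat.pow_pos (by norm_num)
  have h8 : 8 ^ (g + 1) = 8 * 8 ^ g := by rw [pow_succ]; ring
  simp only [Nat.add_sub_cancel, h8]
  have h1 : 6 - (i + 1) = 6 - i - 1 := by omega
  have h3 : 3 ≤ 6 - i := by omega
  rw [h1, Nat.sub_mul]
  have h2 : 8 * 8 ^ g ≤ (6 - i) * (8 * 8 ^ g) := by
    calc 8 * 8 ^ g = 1 * (8 * 8 ^ g) := by ring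
    _ ≤ (6 - i) * (8 * 8 ^ g) := Nat.mul_le_mul_right _ (by omega)
  omega

theorem pvMu_inc_key (i f : Nat) (hi : ¬ 4 ≤ i) (S : Nat) :
    (6 - (i + 1)) * 8 ^ f + 1 + S < (6 - i) * 8 ^ f + 1 + S := by
  have hP : 0 < 8 ^ f := Nat.pow_pos (by norm_num)
  have h : (6 - (i + 1)) * 8 ^ f < (6 - i) * 8 ^ f :=
    Nat.mul_lt_mul_of_lt_of_le (by omega) (le_refl _) hP
  omega

-- B's while-stack loop; frames carry (cell, parent, next direction index); the per-frame
-- fuel f (decremented on push, initial rows*cols-1) only makes the loop total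
def machineB (grid : List (List String)) (rows cols : Int) (ch : String) :
    List PvFrame → PySem.Set (Int × Int) → Bool × PySem.Set (Int × Int)
  | [], v => (false, v)
  | fr :: rest, v =>
    if h4 : 4 ≤ fr.i then machineB grid rows cols ch rest v
    else
      let d := pvDirs.getD fr.i (0, 0)
      let nr := fr.r + d.1
      let nc := fr.c + d.2
      if 0 ≤ nr ∧ nr < rows ∧ 0 ≤ nc ∧ nc < cols then
        if pvCell grid nr nc = ch then
          if PySem.Set.contains v (nr, nc) then
            if (nr, nc) ≠ (fr.pr, fr.pc) then (true, v)
            else machineB grid rows cols ch ({ fr with i := fr.i + 1 } :: rest) v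
          else
            if h0 : fr.f = 0 then machineB grid rows cols ch ({ fr with i := fr.i + 1 } :: rest) v
            else machineB grid rows cols ch
              (⟨nr, nc, fr.r, fr.c, 0, fr.f - 1⟩ :: { fr with i := fr.i + 1 } :: rest)
              (PySem.Set.add v (nr, nc))
        else machineB grid rows cols ch ({ fr with i := fr.i + 1 } :: rest) v
      else machineB grid rows cols ch ({ fr with i := fr.i + 1 } :: rest) v
termination_by s _ => pvMu s
decreasing_by
  all_goals simp only [pvMu, List.map_cons, List.sum_cons]
  all_goals first
    | omega
    | exact pvMu_inc_key fr.i fr.f h4 _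
    | exact pvMu_child_key fr.i fr.f h4 h0 _

def containsCycle_alt (grid : List (List String)) : Bool :=
  match grid with
  | [] => false
  | row0 :: _ =>
    if row0.isEmpty then false
    else
      let rows : Int := (grid.length : Int)
      let cols : Int := ((row0.length : Nat) : Int)
      ((PySem.List.pyRange 0 rows 1).foldl (fun st sr =>
          (PySem.List.pyRange 0 cols 1).foldl (fun st sc =>
            if st.1 then st
            else if PySem.Set.contains st.2 (sr, sc) then st
            else machineB grid rows cols (pvCell grid sr sc)
                   [⟨sr, sc, -1, -1, 0, grid.length * row0.length - 1⟩]
                   (PySem.Set.add st.2 (sr, sc))) st)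
        (false, ([] : PySem.Set (Int × Int)))).1

-- ===== PRECONDITION & SPEC =====
-- Pre_ excludes ragged grids (some row shorter than row 0): there Python A (and B) raises
-- IndexError unless a cycle is found before any short row is probed.
def Pre_containsCycle (grid : List (List String)) : Prop :=
  ∀ row ∈ grid, (grid.headD []).length ≤ row.length
instance (grid : List (List String)) : Decidable (Pre_containsCycle grid) := by
  unfold Pre_containsCycle; infer_instance

def pvWitness_containsCycle : List (List String) := [["a", "b"], ["c", "d"]]

def Spec_containsCycle (grid : List (List String)) (out : Bool) : Prop := out = containsCycle_alt grid
instance (grid : List (List String)) (out : Bool) : Decidable (Spec_containsCycle grid out) := by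
  unfold Spec_containsCycle; infer_instance

-- ===== CLAIM (what is proved, stated in full; the proofs are below) =====
def Claim_equal_containsCycle : Prop := ∀ (grid : List (List String)), Dom_containsCycle grid → Pre_containsCycle grid → Spec_containsCycle grid (containsCycle grid)

-- ===== LEMMAS AND PROOFS =====

theorem pv_foldl_stepA_true (grid : List (List String)) (rows cols : Int) (ch : String)
    (r c pr pc : Int) (rec : Int → Int → Int → Int → PySem.Set (Int × Int) → Bool × PySem.Set (Int × Int))
    (ds : List (Int × Int)) (v : PySem.Set (Int × Int)) :
    ds.foldl (stepA grid rows cols ch r c pr pc rec) (true, v) = (true, v) := by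
  induction ds with
  | nil => rfl
  | cons d ds ih => simp [stepA, ih]

def pvRHS (grid : List (List String)) (rows cols : Int) (ch : String) (n i : Nat)
    (r c pr pc : Int) (rest : List PvFrame) (w : PySem.Set (Int × Int)) : Bool × PySem.Set (Int × Int) :=
  let res := (pvDirs.drop i).foldl
      (stepA grid rows cols ch r c pr pc
        (fun nr nc pr' pc' w' => dfsA grid rows cols ch n nr nc pr' pc' w'))
      (false, w)
  if res.1 then res else machineB grid rows cols ch rest res.2

theorem pv_bisim_base (grid : List (List String)) (rows cols : Int) (ch : String) (n i : Nat)
    (r c pr pc : Int) (rest : List PvFrame) (w : PySem.Set (Int × Int)) (h4 : 4 ≤ i) :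
    machineB grid rows cols ch (⟨r, c, pr, pc, i, n⟩ :: rest) w
      = pvRHS grid rows cols ch n i r c pr pc rest w := by
  have hdrop : pvDirs.drop i = [] := List.drop_eq_nil_of_le (by simp [pvDirs]; omega)
  rw [machineB, dif_pos h4]
  simp [pvRHS, hdrop]

theorem pv_bisim (grid : List (List String)) (rows cols : Int) (ch : String) :
    ∀ (n i : Nat) (r c pr pc : Int) (rest : List PvFrame) (w : PySem.Set (Int × Int)),
      machineB grid rows cols ch (⟨r, c, pr, pc, i, n⟩ :: rest) w
        = pvRHS grid rows cols ch n i r c pr pc rest w := by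
  intro n
  induction n using Nat.strong_induction_on with
  | _ n IH =>
    have inner : ∀ (j i : Nat), 4 ≤ i + j → ∀ (r c pr pc : Int) (rest : List PvFrame)
        (w : PySem.Set (Int × Int)),
        machineB grid rows cols ch (⟨r, c, pr, pc, i, n⟩ :: rest) w
          = pvRHS grid rows cols ch n i r c pr pc rest w := by
      intro j
      induction j with
      | zero =>
        intro i hij r c pr pc rest w
        exact pv_bisim_base grid rows cols ch n i r c pr pc rest w (by omega)
      | succ j IHj =>
        intro i hij r c pr pc rest w
        by_cases h4 : 4 ≤ i
        · exact pv_bisim_base grid rows cols ch n i r c pr pc rest w h4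
        · have hlen : i < pvDirs.length := by simp [pvDirs]; omega
          have hdrop : pvDirs.drop i = pvDirs.getD i (0, 0) :: pvDirs.drop (i + 1) := by
            rw [List.getD_eq_getElem _ _ hlen]
            exact List.drop_eq_getElem_cons hlen
          have hIH1 := IHj (i + 1) (by omega)
          rw [machineB, dif_neg h4]
          simp only [pvRHS, hdrop, List.foldl_cons, stepA]
          set d := pvDirs.getD i (0, 0) with hd
          simp only [Bool.false_eq_true, if_false]
          by_cases hb : 0 ≤ r + d.1 ∧ r + d.1 < rows ∧ 0 ≤ c + d.2 ∧ c + d.2 < cols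
          · rw [if_pos hb, if_pos hb]
            by_cases hc : pvCell grid (r + d.1) (c + d.2) = ch
            · rw [if_pos hc, if_pos hc]
              by_cases hm : PySem.Set.contains w (r + d.1, c + d.2) = true
              · rw [if_pos hm, if_pos hm]
                by_cases hne : ((r + d.1, c + d.2) : Int × Int) ≠ (pr, pc)
                · rw [if_pos hne, if_pos hne]
                  rw [pv_foldl_stepA_true]
                  simp
                · rw [if_neg hne, if_neg hne]
                  rw [hIH1 r c pr pc rest w]
                  rfl
              · rw [if_neg hm, if_neg hm]
                match n with
                | 0 =>
                  rw [dif_pos rfl]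
                  rw [hIH1 r c pr pc rest w]
                  rfl
                | Nat.succ m =>
                  rw [dif_neg (Nat.succ_ne_zero m)]
                  have hch := IH m (Nat.lt_succ_self m) 0 (r + d.1) (c + d.2) r c
                    (⟨r, c, pr, pc, i + 1, Nat.succ m⟩ :: rest) (PySem.Set.add w (r + d.1, c + d.2))
                  simp only [Nat.succ_sub_one]
                  rw [hch]
                  have hres : pvDirs.foldl
                      (stepA grid rows cols ch (r + d.1) (c + d.2) r c
                        (fun nr nc pr' pc' w' => dfsA grid rows cols ch m nr nc pr' pc' w'))
                      (false, PySem.Set.add w (r + d.1, c + d.2))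
                      = dfsA grid rows cols ch (Nat.succ m) (r + d.1) (c + d.2) r c w := rfl
                  simp only [pvRHS, List.drop_zero, hres]
                  cases hr1 : (dfsA grid rows cols ch (Nat.succ m) (r + d.1) (c + d.2) r c w).1
                  · have hx : dfsA grid rows cols ch (Nat.succ m) (r + d.1) (c + d.2) r c w
                        = (false, (dfsA grid rows cols ch (Nat.succ m) (r + d.1) (c + d.2) r c w).2) := by
                      rw [← hr1]
                    rw [if_neg (by simp)]
                    rw [hIH1 r c pr pc rest
                      (dfsA grid rows cols ch (Nat.succ m) (r + d.1) (c + d.2) r c w).2]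
                    conv_rhs => rw [hx]
                    rfl
                  · have hx : dfsA grid rows cols ch (Nat.succ m) (r + d.1) (c + d.2) r c w
                        = (true, (dfsA grid rows cols ch (Nat.succ m) (r + d.1) (c + d.2) r c w).2) := by
                      rw [← hr1]
                    rw [if_pos (by simp)]
                    conv_rhs => rw [hx, pv_foldl_stepA_true]
                    rw [hx]
                    simp
            · rw [if_neg hc, if_neg hc]
              rw [hIH1 r c pr pc rest w]
              rfl
          · rw [if_neg hb, if_neg hb]
            rw [hIH1 r c pr pc rest w]
            rfl
    intro i r c pr pc rest w
    exact inner 4 i (by omega) r c pr pc rest w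

theorem pv_cell (grid : List (List String)) (rows cols : Int) (ch : String)
    (n : Nat) (r c pr pc : Int) (v : PySem.Set (Int × Int)) :
    machineB grid rows cols ch [⟨r, c, pr, pc, 0, n⟩] (PySem.Set.add v (r, c))
      = dfsA grid rows cols ch (n + 1) r c pr pc v := by
  rw [pv_bisim grid rows cols ch n 0 r c pr pc [] (PySem.Set.add v (r, c))]
  have hres : pvDirs.foldl
      (stepA grid rows cols ch r c pr pc
        (fun nr nc pr' pc' w' => dfsA grid rows cols ch n nr nc pr' pc' w'))
      (false, PySem.Set.add v (r, c)) = dfsA grid rows cols ch (n + 1) r c pr pc v := rfl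
  simp only [pvRHS, List.drop_zero, hres]
  cases hr1 : (dfsA grid rows cols ch (n + 1) r c pr pc v).1
  · have hx : dfsA grid rows cols ch (n + 1) r c pr pc v
        = (false, (dfsA grid rows cols ch (n + 1) r c pr pc v).2) := by rw [← hr1]
    rw [if_neg (by simp), machineB]
    conv_rhs => rw [hx]
  · rw [if_pos (by simp)]

-- ===== VERDICT (by name: the statement is the Claim_ definition above) =====
theorem containsCycle_spec : Claim_equal_containsCycle := by
  intro grid _ _
  unfold Spec_containsCycle containsCycle containsCycle_alt
  cases grid with
  | nil => rfl
  | cons row0 tail =>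
    by_cases h0 : row0.isEmpty
    · simp [h0]
    · simp only [h0, if_false, Bool.false_eq_true]
      have hN : (row0 :: tail).length * row0.length - 1 + 1 = (row0 :: tail).length * row0.length := by
        have : row0.length ≠ 0 := by
          simpa [List.isEmpty_iff, List.length_eq_zero_iff] using h0
        simp only [List.length_cons]
        have h1 : 0 < row0.length := by omega
        have : 0 < (tail.length + 1) * row0.length := Nat.mul_pos (Nat.succ_pos _) h1
        omega
      congr 1
      apply List.foldl_ext
      intro st sr _
      apply List.foldl_ext
      intro st' sc _
      by_cases h1 : st'.1
      · simp [h1]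
      · simp only [h1, Bool.false_eq_true, if_false]
        by_cases h2 : PySem.Set.contains st'.2 (sr, sc) = true
        · rw [if_pos h2, if_pos h2]
        · rw [if_neg h2, if_neg h2, pv_cell, hN]
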